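-- pv_equiv track=rewrite | github.com/Roonil03/ThirdYearCodes | IS/Lab3/ElGamal_AQ.py | string_to_chunks
-- ===== SOURCE A (Python) =====
-- def string_to_chunks(text, chunk_size):
--     chunks = []
--     text_bytes = text.encode()
--     for i in range(0, len(text_bytes), chunk_size):
--         chunk = text_bytes[i:i + chunk_size]
--         chunk_int = int.from_bytes(chunk, 'big')
--         chunks.append(chunk_int)
--     return chunks
-- ===== SOURCE B (Python) =====
-- def string_to_chunks(text, chunk_size):
--     if chunk_size <= 0:
--         return []
--     chunks = []
--     buf = bytearray()
--     for b in text.encode():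
--         buf.append(b)
--         if len(buf) == chunk_size:
--             chunks.append(int.from_bytes(buf, 'big'))
--             buf.clear()
--     if buf:
--         chunks.append(int.from_bytes(buf, 'big'))
--     return chunks
-- ===== Notes on version B (the rewrite author's own statement) =====
-- stated objective: alternative
-- what changed: Replaces the stride-range plus slice-plus-int.from_bytes loop with a single flat pass over the bytes that fills a buffer and flushes it as an integer whenever it reaches chunk_size; no index range and no slicing.
import Mathlib
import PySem

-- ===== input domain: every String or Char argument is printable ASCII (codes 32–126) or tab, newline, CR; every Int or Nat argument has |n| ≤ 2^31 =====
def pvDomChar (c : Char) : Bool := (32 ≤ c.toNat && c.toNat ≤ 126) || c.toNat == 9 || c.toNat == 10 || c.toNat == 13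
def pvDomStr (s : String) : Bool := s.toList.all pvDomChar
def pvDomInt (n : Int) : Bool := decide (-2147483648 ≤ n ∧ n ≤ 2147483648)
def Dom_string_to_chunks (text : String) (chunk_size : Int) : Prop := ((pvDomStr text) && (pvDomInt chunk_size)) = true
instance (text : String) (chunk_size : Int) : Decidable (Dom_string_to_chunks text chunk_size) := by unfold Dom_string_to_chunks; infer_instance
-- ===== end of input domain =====

-- B replaces the stride-range/slice loop with one flat pass over the bytes that fills
-- a buffer and flushes it as an integer when it reaches chunk_size (objective: alternative).


-- ===== PORT A =====
-- text.encode(): exact on the ASCII domain (UTF-8 bytes = code points there)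
def pvEncode (text : String) : List Int := text.toList.map (fun c => (c.toNat : Int))
-- int.from_bytes(chunk, 'big'), ported by hand: big-endian Horner fold; exact for byte lists
def pvFromBytesBE (chunk : List Int) : Int := chunk.foldl (fun a b => a * 256 + b) 0

def string_to_chunks (text : String) (chunk_size : Int) : List Int :=
  let text_bytes := pvEncode text
  (PySem.List.pyRange 0 (text_bytes.length : Int) chunk_size).foldl
    (fun chunks i =>
      chunks ++ [pvFromBytesBE (PySem.List.slice text_bytes (some i) (some (i + chunk_size)))])
    []

-- ===== PORT B =====
def pvStepB (cs : Int) (st : List Int × List Int) (b : Int) : List Int × List Int :=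
  let buf := st.2 ++ [b]
  if (buf.length : Int) = cs then (st.1 ++ [pvFromBytesBE buf], []) else (st.1, buf)

def string_to_chunks_alt (text : String) (chunk_size : Int) : List Int :=
  if chunk_size ≤ 0 then []
  else
    let st := (pvEncode text).foldl (pvStepB chunk_size) ([], [])
    if st.2 ≠ [] then st.1 ++ [pvFromBytesBE st.2] else st.1

-- ===== PRECONDITION & SPEC =====
-- Pre_ excludes exactly chunk_size = 0, where A's range(0, len, 0) raises ValueError.
def Pre_string_to_chunks (text : String) (chunk_size : Int) : Prop := chunk_size ≠ 0
instance (text : String) (chunk_size : Int) : Decidable (Pre_string_to_chunks text chunk_size) := by unfold Pre_string_to_chunks; infer_instance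
def pvWitness_string_to_chunks : String × Int := ("abc", 2)

def Spec_string_to_chunks (text : String) (chunk_size : Int) (out : List Int) : Prop := out = string_to_chunks_alt text chunk_size
instance (text : String) (chunk_size : Int) (out : List Int) : Decidable (Spec_string_to_chunks text chunk_size out) := by unfold Spec_string_to_chunks; infer_instance

-- ===== CLAIM (what is proved, stated in full; the proofs are below) =====
def Claim_equal_string_to_chunks : Prop := ∀ (text : String) (chunk_size : Int), Dom_string_to_chunks text chunk_size → Pre_string_to_chunks text chunk_size → Spec_string_to_chunks text chunk_size (string_to_chunks text chunk_size)

-- ===== LEMMAS AND PROOFS =====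

-- reference function: split into chunks of m+1 bytes, big-endian value of each
def pvChunks (m : Nat) : List Int → List Int
  | [] => []
  | b :: rest => pvFromBytesBE (b :: rest.take m) :: pvChunks m (rest.drop m)
termination_by bs => bs.length
decreasing_by simp

-- B's finalize step, named so the lemmas can rewrite it
def pvFin (st : List Int × List Int) : List Int :=
  if st.2 ≠ [] then st.1 ++ [pvFromBytesBE st.2] else st.1

theorem pvChunks_nil (m : Nat) : pvChunks m [] = [] := by
  simp only [pvChunks]

theorem pvChunks_ne_nil (m : Nat) (bs : List Int) (h : bs ≠ []) :
    pvChunks m bs = pvFromBytesBE (bs.take (m + 1)) :: pvChunks m (bs.drop (m + 1)) := by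
  cases bs with
  | nil => exact absurd rfl h
  | cons b rest => simp only [pvChunks]; simp

theorem pyRange_neg_nil (b s : Int) (hs : s < 0) (hb : 0 ≤ b) :
    PySem.List.pyRange 0 b s = [] := by
  simp [PySem.List.pyRange, show s ≠ 0 by omega, show ¬ (0:Int) < s by omega,
        show ¬ b < 0 by omega]

theorem pyRange_pos_nil (a b s : Int) (hs : 0 < s) (h : b ≤ a) :
    PySem.List.pyRange a b s = [] := by
  rw [PySem.List.pyRange_of_pos a b hs]
  simp [show ¬ a < b by omega]

theorem pyRange_pos_cons (a b s : Int) (hs : 0 < s) (h : a < b) :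
    PySem.List.pyRange a b s = a :: PySem.List.pyRange (a + s) b s := by
  rw [PySem.List.pyRange_of_pos a b hs, PySem.List.pyRange_of_pos (a + s) b hs]
  have hnn : 0 ≤ (b - a - 1) / s := Int.ediv_nonneg (by omega) (by omega)
  have htail : (if a + s < b then ((b - (a + s) + s - 1) / s).toNat else 0)
      = ((b - a - 1) / s).toNat := by
    by_cases hc : a + s < b
    · rw [if_pos hc]; congr 2; ring
    · rw [if_neg hc, show b - a - 1 = b - a - 1 from rfl]
      rw [Int.ediv_eq_zero_of_lt (by omega) (by omega)]
      simp
  have hhead : (if a < b then ((b - a + s - 1) / s).toNat else 0)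
      = ((b - a - 1) / s).toNat + 1 := by
    rw [if_pos h, show b - a + s - 1 = (b - a - 1) + 1 * s by ring,
        Int.add_mul_ediv_right _ _ (by omega : s ≠ 0)]
    omega
  rw [htail, hhead, List.range_succ_eq_map]
  simp only [List.map_cons, List.map_map, Nat.cast_zero, mul_zero, add_zero]
  congr 1
  apply List.map_congr_left
  intro k _
  simp only [Function.comp_apply]
  push_cast
  ring

theorem foldl_app (f : Int → Int) (l : List Int) : ∀ out : List Int,
    l.foldl (fun acc i => acc ++ [f i]) out = out ++ l.map f := by
  induction l with
  | nil => simp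
  | cons x xs ih => intro out; simp [List.foldl_cons, ih]

theorem A_map (bs : List Int) (cs : Int) (m : Nat) (hm : cs = (m : Int) + 1) :
    ∀ (n : Nat) (a : Int), 0 ≤ a → bs.length - a.toNat ≤ n →
      (PySem.List.pyRange a (bs.length : Int) cs).map
        (fun i => pvFromBytesBE (PySem.List.slice bs (some i) (some (i + cs)))) =
      pvChunks m (bs.drop a.toNat) := by
  intro n
  induction n with
  | zero =>
    intro a ha hn
    rw [pyRange_pos_nil _ _ _ (by omega) (by omega), List.drop_eq_nil_of_le (by omega)]
    simp [pvChunks_nil]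
  | succ n ih =>
    intro a ha hn
    by_cases hlt : a < (bs.length : Int)
    · have htn : (a + cs).toNat = a.toNat + (m + 1) := by omega
      have hbound : bs.length - (a + cs).toNat ≤ n := by omega
      have hne : bs.drop a.toNat ≠ [] := by
        intro hnil
        have := List.drop_eq_nil_iff.mp hnil
        omega
      rw [pyRange_pos_cons _ _ _ (by omega) hlt, List.map_cons,
        ih (a + cs) (by omega) hbound]
      conv_rhs => rw [pvChunks_ne_nil m (bs.drop a.toNat) hne]
      congr 1
      · rw [PySem.List.slice_toNat _ ha (by omega : (0:Int) ≤ a + cs),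
          show (a + cs).toNat - a.toNat = m + 1 from by omega]
      · rw [List.drop_drop, htn]
    · rw [pyRange_pos_nil _ _ _ (by omega) (by omega),
        List.drop_eq_nil_of_le (by omega)]
      simp [pvChunks_nil]

theorem B_partial (cs : Int) (c : List Int) : ∀ (out buf : List Int),
    ((buf.length : Int) + c.length < cs) →
    c.foldl (pvStepB cs) (out, buf) = (out, buf ++ c) := by
  induction c with
  | nil => intro out buf _; simp
  | cons b rest ih =>
    intro out buf hlt
    have hne : ¬ (((buf ++ [b]).length : Int) = cs) := by simp at hlt ⊢; omega
    simp only [List.foldl_cons, pvStepB, if_neg hne]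
    rw [ih out (buf ++ [b]) (by simp at hlt ⊢; omega)]
    simp

theorem B_full (cs : Int) (c : List Int) : ∀ (out buf : List Int),
    ((buf.length : Int) < cs) → ((buf.length : Int) + c.length = cs) →
    c.foldl (pvStepB cs) (out, buf) = (out ++ [pvFromBytesBE (buf ++ c)], []) := by
  induction c with
  | nil => intro out buf h1 h2; simp at h2; omega
  | cons b rest ih =>
    intro out buf h1 h2
    by_cases hc : ((buf ++ [b]).length : Int) = cs
    · have hr : rest = [] := List.length_eq_zero_iff.mp (by simp at h2 hc; omega)
      subst hr
      have hc' : ((buf.length : Int) + 1 = cs) := by simp at hc; omega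
      simp [pvStepB, hc']
    · simp only [List.foldl_cons, pvStepB, if_neg hc]
      rw [ih out (buf ++ [b]) (by simp at hc h2 ⊢; omega) (by simp at h2 ⊢; omega)]
      simp

theorem B_main (cs : Int) (m : Nat) (hm : cs = (m : Int) + 1) :
    ∀ (n : Nat) (bs : List Int), bs.length ≤ n → ∀ (out : List Int),
      pvFin (bs.foldl (pvStepB cs) (out, [])) = out ++ pvChunks m bs := by
  intro n
  induction n with
  | zero =>
    intro bs hn out
    have : bs = [] := List.length_eq_zero_iff.mp (by omega)
    subst this
    rw [pvChunks_nil]; simp [pvFin]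
  | succ n ih =>
    intro bs hn out
    rcases bs with _ | ⟨b, rest⟩
    · rw [pvChunks_nil]; simp [pvFin]
    · by_cases hsmall : ((b :: rest).length : Int) < cs
      · have hrest : pvChunks m ((b :: rest).drop (m + 1)) = [] := by
          rw [List.drop_eq_nil_of_le (by simp at hsmall ⊢; omega), pvChunks_nil]
        rw [B_partial cs (b :: rest) out [] (by simp at hsmall ⊢; omega)]
        conv_rhs => rw [pvChunks_ne_nil m (b :: rest) (by simp)]
        rw [hrest, List.take_of_length_le (by simp at hsmall ⊢; omega)]
        simp [pvFin]
      · have hk : (m + 1 : Nat) ≤ (b :: rest).length := by simp at hsmall ⊢; omega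
        have hlen : (((b :: rest).take (m + 1)).length : Int) = cs := by
          rw [List.length_take, min_eq_left hk]
          push_cast
          omega
        conv_lhs => rw [show b :: rest
              = (b :: rest).take (m + 1) ++ (b :: rest).drop (m + 1) from
            (List.take_append_drop _ _).symm]
        rw [List.foldl_append,
          B_full cs _ out [] (by simp; omega) (by simpa using hlen)]
        have hdlen : ((b :: rest).drop (m + 1)).length ≤ n := by
          simp at hn ⊢
          omega
        rw [ih ((b :: rest).drop (m + 1)) hdlen]
        conv_rhs => rw [pvChunks_ne_nil m (b :: rest) (by simp)]
        simp [List.append_assoc]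

-- ===== VERDICT (by name: the statement is the Claim_ definition above) =====
theorem string_to_chunks_spec : Claim_equal_string_to_chunks := by
  unfold Claim_equal_string_to_chunks
  intro text cs _ hpre
  unfold Spec_string_to_chunks
  show (PySem.List.pyRange 0 (((pvEncode text).length : Nat) : Int) cs).foldl
      (fun chunks i =>
        chunks ++ [pvFromBytesBE (PySem.List.slice (pvEncode text) (some i) (some (i + cs)))]) []
    = if cs ≤ 0 then [] else pvFin ((pvEncode text).foldl (pvStepB cs) ([], []))
  rcases lt_trichotomy cs 0 with hneg | hzero | hpos
  · rw [pyRange_neg_nil _ _ hneg (Int.natCast_nonneg _), if_pos (by omega)]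
    simp
  · exact absurd hzero hpre
  · have hm : cs = ((cs.toNat - 1 : Nat) : Int) + 1 := by omega
    rw [if_neg (by omega), foldl_app,
      A_map (pvEncode text) cs (cs.toNat - 1) hm (pvEncode text).length 0 le_rfl (by simp),
      B_main cs (cs.toNat - 1) hm (pvEncode text).length (pvEncode text) le_rfl []]
    simp
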